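-- pv_equiv track=rewrite | github.com/manulon/TeoriaDeAlgoritmos1 | TP2/bellman-ford.py | string_ciclo
-- ===== SOURCE A (Python) =====
-- def string_ciclo(ciclo):
--     c = ""
--     for i in ciclo:
--         c += i
--     cadena_invertida = ""
--     for letra in c:
--         cadena_invertida = letra + cadena_invertida
--     return cadena_invertida
-- ===== SOURCE B (Python) =====
-- def string_ciclo(ciclo):
--     return ''.join(s[::-1] for s in reversed(ciclo))
-- ===== Notes on version B (the rewrite author's own statement) =====
-- stated objective: idiomatic
-- what changed: Instead of concatenating everything into one string and then reversing it character by character with quadratic string prepends, B distributes the reversal over the elements: it walks the list back-to-front, reverses each element with a slice, and joins the pieces in one pass.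
import Mathlib
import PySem

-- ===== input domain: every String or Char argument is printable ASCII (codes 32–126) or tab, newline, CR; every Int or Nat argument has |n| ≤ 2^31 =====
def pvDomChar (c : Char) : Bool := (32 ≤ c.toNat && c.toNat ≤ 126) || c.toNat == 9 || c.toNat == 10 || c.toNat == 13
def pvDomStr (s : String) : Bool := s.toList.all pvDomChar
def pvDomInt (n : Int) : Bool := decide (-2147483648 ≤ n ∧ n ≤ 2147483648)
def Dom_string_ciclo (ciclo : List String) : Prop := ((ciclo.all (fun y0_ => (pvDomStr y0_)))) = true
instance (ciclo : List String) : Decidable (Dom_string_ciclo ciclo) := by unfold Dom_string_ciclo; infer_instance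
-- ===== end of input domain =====

-- ===== PORT A =====
-- A: concatenate all strings, then reverse by prepending each character.
-- (String contents are carried as List Char, the exact representation of Python str.)
def string_ciclo (ciclo : List String) : String :=
  let c : List Char := ciclo.foldl (fun acc i => acc ++ i.toList) []
  let cadena_invertida : List Char := c.foldl (fun acc letra => letra :: acc) []
  String.ofList cadena_invertida

-- ===== PORT B =====
-- B: ''.join(s[::-1] for s in reversed(ciclo))
def string_ciclo_alt (ciclo : List String) : String :=
  PySem.Str.join "" (ciclo.reverse.map (fun s => String.ofList s.toList.reverse))

-- ===== PRECONDITION & SPEC =====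
def Spec_string_ciclo (ciclo : List String) (out : String) : Prop := out = string_ciclo_alt ciclo
instance (ciclo : List String) (out : String) : Decidable (Spec_string_ciclo ciclo out) := by unfold Spec_string_ciclo; infer_instance

-- ===== CLAIM (what is proved, stated in full; the proofs are below) =====
def Claim_equal_string_ciclo : Prop := ∀ (ciclo : List String), Dom_string_ciclo ciclo → Spec_string_ciclo ciclo (string_ciclo ciclo)

-- ===== LEMMAS AND PROOFS =====

-- ''.join with empty separator is flatten
theorem join_empty_sep (parts : List (List Char)) :
    PySem.Chars.join [] parts = parts.flatten := by
  induction parts with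
  | nil => simp [PySem.Chars.join, List.intercalate]
  | cons x xs ih => cases xs with
    | nil => simp [PySem.Chars.join, List.intercalate]
    | cons y ys =>
      simpa [PySem.Chars.join, List.intercalate, List.intersperse] using ih

-- ===== VERDICT (by name: the statement is the Claim_ definition above) =====
theorem string_ciclo_spec : Claim_equal_string_ciclo := by
  intro ciclo _
  unfold Spec_string_ciclo string_ciclo string_ciclo_alt
  simp [PySem.Str.join, join_empty_sep, Function.comp_def,
        ← List.map_reverse, List.reverse_flatten]
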